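-- pv_equiv track=rewrite | github.com/kshitij1010/practice | interview/python/algo/geeksforgeeks/25_interview_questions/ex19.py | product_of_pre_next
-- ===== SOURCE A (Python) =====
-- def product_of_pre_next(arr):
--     if len(arr) == 0 or arr is None:
--         return []
--
--     if len(arr) == 1:
--         return arr
--
--     res = []
--
--     for i in range(len(arr)):
--         if i == 0:
--             res.append(arr[i] * arr[i+1])
--         elif i == len(arr)-1:
--             res.append(arr[i] * arr[i-1])
--         else:
--             res.append(arr[i-1] * arr[i+1])
--     return res
-- ===== SOURCE B (Python) =====
-- def product_of_pre_next(arr):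
--     if len(arr) == 0 or arr is None:
--         return []
--
--     if len(arr) == 1:
--         return arr
--
--     prev = [arr[0]] + arr[:-1]
--     nxt = arr[1:] + [arr[-1]]
--     return [p * n for p, n in zip(prev, nxt)]
-- ===== Notes on version B (the rewrite author's own statement) =====
-- stated objective: simpler
-- what changed: Replaces the per-index positional branching (first/last/middle cases inside the loop) with two shifted copies of the list (prev = [arr[0]] + arr[:-1], nxt = arr[1:] + [arr[-1]]) combined by one uniform pairwise multiply.
import Mathlib
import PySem

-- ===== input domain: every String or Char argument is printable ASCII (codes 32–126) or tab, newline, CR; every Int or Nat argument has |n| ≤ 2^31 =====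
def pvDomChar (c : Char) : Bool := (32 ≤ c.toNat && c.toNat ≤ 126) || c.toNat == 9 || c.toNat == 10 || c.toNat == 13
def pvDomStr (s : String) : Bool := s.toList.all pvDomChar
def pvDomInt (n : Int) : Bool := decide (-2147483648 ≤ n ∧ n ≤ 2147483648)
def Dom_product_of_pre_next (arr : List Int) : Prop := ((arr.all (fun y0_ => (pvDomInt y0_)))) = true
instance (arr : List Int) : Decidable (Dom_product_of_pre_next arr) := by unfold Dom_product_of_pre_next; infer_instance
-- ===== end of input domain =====

-- B replaces A's per-index first/last/middle branching with two shifted copies of the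
-- list combined by one uniform pairwise multiply (objective: simpler).

-- ===== PORT A =====
-- loop 'for i in range(len(arr))' with the three positional branches, each appending one element
def product_of_pre_next (arr : List Int) : List Int :=
  if arr.length = 0 then []
  else if arr.length = 1 then arr
  else
    (PySem.List.pyRange 0 arr.length 1).foldl (fun res i =>
      res ++ [if i = 0 then
                PySem.List.pyGetD arr i 0 * PySem.List.pyGetD arr (i + 1) 0
              else if i = (arr.length : Int) - 1 then
                PySem.List.pyGetD arr i 0 * PySem.List.pyGetD arr (i - 1) 0
              else
                PySem.List.pyGetD arr (i - 1) 0 * PySem.List.pyGetD arr (i + 1) 0]) []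

-- ===== PORT B =====
-- prev = [arr[0]] + arr[:-1]; nxt = arr[1:] + [arr[-1]]; pairwise product
def product_of_pre_next_alt (arr : List Int) : List Int :=
  if arr.length = 0 then []
  else if arr.length = 1 then arr
  else
    let prev := [PySem.List.pyGetD arr 0 0] ++ PySem.List.slice arr none (some (-1))
    let nxt := PySem.List.slice arr (some 1) none ++ [PySem.List.pyGetD arr (-1) 0]
    (prev.zip nxt).map (fun p => p.1 * p.2)

-- ===== PRECONDITION & SPEC =====
def Spec_product_of_pre_next (arr : List Int) (out : List Int) : Prop := out = product_of_pre_next_alt arr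
instance (arr : List Int) (out : List Int) : Decidable (Spec_product_of_pre_next arr out) := by unfold Spec_product_of_pre_next; infer_instance

-- ===== CLAIM (what is proved, stated in full; the proofs are below) =====
def Claim_equal_product_of_pre_next : Prop := ∀ (arr : List Int), Dom_product_of_pre_next arr → Spec_product_of_pre_next arr (product_of_pre_next arr)

-- ===== LEMMAS AND PROOFS =====

theorem pv_core (arr : List Int) (h2 : 2 ≤ arr.length) :
    (PySem.List.pyRange 0 arr.length 1).foldl (fun res i =>
      res ++ [if i = 0 then
                PySem.List.pyGetD arr i 0 * PySem.List.pyGetD arr (i + 1) 0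
              else if i = (arr.length : Int) - 1 then
                PySem.List.pyGetD arr i 0 * PySem.List.pyGetD arr (i - 1) 0
              else
                PySem.List.pyGetD arr (i - 1) 0 * PySem.List.pyGetD arr (i + 1) 0]) []
    =
    ((([PySem.List.pyGetD arr 0 0] ++ PySem.List.slice arr none (some (-1))).zip
       (PySem.List.slice arr (some 1) none ++ [PySem.List.pyGetD arr (-1) 0])).map
      (fun p => p.1 * p.2)) := by
  rw [PySem.List.foldl_append_singleton_eq_map, PySem.List.pyRange_one,
      PySem.List.slice_to_neg_one, PySem.List.slice_from_one, List.map_map]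
  have hne : arr ≠ [] := by intro h; simp [h] at h2
  have hget : ∀ (j : Nat), PySem.List.pyGetD arr (j : Int) 0 = arr.getD j 0 :=
    fun j => PySem.List.pyGetD_natCast arr j 0
  apply List.ext_getElem
  · simp [List.length_zip]; omega
  · intro k hk1 hk2
    simp only [List.nil_append, List.length_map, List.length_range] at hk1
    have hk : k < arr.length := by omega
    simp only [List.nil_append, List.getElem_map, List.getElem_range, Function.comp_apply,
      List.getElem_zip, zero_add]
    have hprev : ([PySem.List.pyGetD arr 0 0] ++ arr.dropLast)[k]'(by simp; omega)
        = if k = 0 then arr.getD 0 0 else arr.getD (k-1) 0 := by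
      rcases Nat.eq_zero_or_pos k with h0 | h0
      · subst h0; simp [PySem.List.pyGetD_zero]
      · rw [List.getElem_append_right (by simp; omega)]
        simp only [List.length_cons, List.length_nil]
        rw [List.getElem_dropLast, if_neg (by omega), List.getD_eq_getElem _ _ (by omega)]
    have hnxt : (arr.tail ++ [PySem.List.pyGetD arr (-1) 0])[k]'(by simp; omega)
        = if k = arr.length - 1 then arr.getD (arr.length - 1) 0 else arr.getD (k+1) 0 := by
      rcases Nat.lt_or_ge k (arr.length - 1) with hlt | hge
      · rw [List.getElem_append_left (by simp; omega), List.getElem_tail,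
          if_neg (by omega), List.getD_eq_getElem _ _ (by omega)]
      · have hkeq : k = arr.length - 1 := by omega
        rw [List.getElem_append_right (by simp; omega)]
        simp only [List.getElem_singleton]
        rw [PySem.List.pyGetD_neg_one _ _ hne, if_pos hkeq, List.getLast_eq_getElem,
          List.getD_eq_getElem _ _ (by omega)]
    rw [hprev, hnxt]
    by_cases hk0 : k = 0
    · subst hk0
      rw [if_pos (by norm_num), if_pos rfl, if_neg (by omega)]
      rw [show ((0:Nat):Int) + 1 = ((1:Nat):Int) by norm_num, hget 1, hget 0]
    · have hc1 : ((k:Nat):Int) - 1 = ((k-1:Nat):Int) := by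
        push_cast [Nat.cast_sub (by omega : 1 ≤ k)]; ring
      by_cases hklast : k = arr.length - 1
      · rw [if_neg (by exact_mod_cast hk0), if_pos (by omega), if_neg hk0, if_pos hklast,
            hc1, hget k, hget (k-1), hklast]
        exact mul_comm _ _
      · rw [if_neg (by exact_mod_cast hk0), if_neg (by omega), if_neg hk0, if_neg hklast,
            hc1, show ((k:Nat):Int) + 1 = ((k+1:Nat):Int) by push_cast; ring,
            hget (k-1), hget (k+1)]

theorem product_of_pre_next_eq_alt (arr : List Int) :
    product_of_pre_next arr = product_of_pre_next_alt arr := by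
  unfold product_of_pre_next product_of_pre_next_alt
  split_ifs with h0 h1
  · rfl
  · rfl
  · exact pv_core arr (by omega)


-- ===== VERDICT (by name: the statement is the Claim_ definition above) =====
theorem product_of_pre_next_spec : Claim_equal_product_of_pre_next := by
  intro arr _
  exact product_of_pre_next_eq_alt arr
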